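-- pv_equiv track=rewrite | github.com/wrc-2006/cs201-25spring | 数算练习题/厚道的调分方法  binary search.py | f
-- ===== SOURCE A (Python) =====
-- def f(grade):
--     grade.sort()
--     cnt=0
--     for i in grade:
--         if i>=85:
--             cnt+=1
--     if cnt>=0.6*len(grade):
--         return True
--     return False
-- ===== SOURCE B (Python) =====
-- def f(grade):
--     grade.sort()
--     n = len(grade)
--     lo, hi = 0, n
--     while lo < hi:
--         mid = (lo + hi) // 2
--         if grade[mid] < 85:
--             lo = mid + 1
--         else:
--             hi = mid
--     return 10 * (n - lo) >= 6 * n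
-- ===== Notes on version B (the rewrite author's own statement) =====
-- stated objective: alternative
-- what changed: Replaces the linear counting loop over all grades with a binary search (bisect_left written by hand, since A imports nothing) on the sorted list: the count of grades >= 85 is len - lo, and the float threshold test cnt >= 0.6*len is replaced by the exact integer test 10*cnt >= 6*len, which gives the same Boolean for every list length up to 2^31.
import Mathlib
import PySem

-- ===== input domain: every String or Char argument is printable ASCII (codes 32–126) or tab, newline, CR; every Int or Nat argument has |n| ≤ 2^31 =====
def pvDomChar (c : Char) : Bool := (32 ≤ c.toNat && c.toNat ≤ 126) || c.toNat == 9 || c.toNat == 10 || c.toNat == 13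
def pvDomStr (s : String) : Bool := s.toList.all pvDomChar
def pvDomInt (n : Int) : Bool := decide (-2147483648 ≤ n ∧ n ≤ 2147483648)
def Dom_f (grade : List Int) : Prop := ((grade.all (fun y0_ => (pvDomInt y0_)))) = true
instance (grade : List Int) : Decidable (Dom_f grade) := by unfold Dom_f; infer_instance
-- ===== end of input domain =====

-- B replaces A's linear counting pass by a binary search for the first grade ≥ 85 on the sorted
-- list, and states the 0.6-threshold test in exact integer arithmetic (same Boolean everywhere).
-- Both versions sort the argument in place in Python; the equivalence proved here is about the
-- return value (the mutation is identical: both call grade.sort()).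

-- ===== PORT A =====
def f (grade : List Int) : Bool :=
  let g := PySem.List.sorted grade (fun x => x) false   -- grade.sort()
  let cnt := g.foldl (fun c i => if 85 ≤ i then c + 1 else c) (0 : Int)
  -- Python's float test `cnt >= 0.6*len(grade)`; for every 0 ≤ cnt ≤ n ≤ 2^31 it returns
  -- exactly the same Boolean as the integer test 10*cnt ≥ 6*n, which is how it is ported.
  if 6 * (g.length : Int) ≤ 10 * cnt then true else false

-- ===== PORT B =====
-- transliteration of Source B's hand-written bisect_left loop (`while lo < hi: …`);
-- grade[mid] is ported as getD: mid is always in range (lo ≤ mid < hi ≤ len).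
def bisLeft (xs : List Int) (x : Int) (lo hi : Nat) : Nat :=
  if _h : lo < hi then
    let mid := (lo + hi) / 2
    if xs.getD mid 0 < x then bisLeft xs x (mid + 1) hi
    else bisLeft xs x lo mid
  else lo
termination_by hi - lo
decreasing_by all_goals omega

def f_alt (grade : List Int) : Bool :=
  let g := PySem.List.sorted grade (fun x => x) false   -- grade.sort()
  let n := g.length
  let lo := bisLeft g 85 0 n
  decide (6 * (n : Int) ≤ 10 * ((n : Int) - (lo : Int)))

-- ===== PRECONDITION & SPEC =====
def Spec_f (grade : List Int) (out : Bool) : Prop := out = f_alt grade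
instance (grade : List Int) (out : Bool) : Decidable (Spec_f grade out) := by unfold Spec_f; infer_instance

-- ===== CLAIM (what is proved, stated in full; the proofs are below) =====
def Claim_equal_f : Prop := ∀ (grade : List Int), Dom_f grade → Spec_f grade (f grade)

-- ===== LEMMAS AND PROOFS =====

-- on a (weakly) index-monotone list, xs[mid] < x forces at least mid+1 elements < x
lemma countP_lt_lower (xs : List Int) (x : Int)
    (hmono : ∀ p q : Nat, (hpq : p ≤ q) → (hq : q < xs.length) → xs[p]'(by omega) ≤ xs[q])
    (mid : Nat) (hmid : mid < xs.length) (h : xs[mid] < x) :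
    mid + 1 ≤ xs.countP (fun a => decide (a < x)) := by
  have hxs : xs = xs.take (mid + 1) ++ xs.drop (mid + 1) := (List.take_append_drop _ _).symm
  have htake : (xs.take (mid + 1)).countP (fun a => decide (a < x)) = mid + 1 := by
    have hall : ∀ a ∈ xs.take (mid + 1), (fun a => decide (a < x)) a = true := by
      intro a ha
      rcases List.mem_iff_getElem.mp ha with ⟨i, hi, rfl⟩
      have hlen : (xs.take (mid + 1)).length = mid + 1 := by
        simp [List.length_take]; omega
      have hi' : i < xs.length := by
        have := hi; rw [List.length_take] at this; omega
      have : (xs.take (mid + 1))[i] = xs[i]'hi' := List.getElem_take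
      rw [this]
      have hle : xs[i]'hi' ≤ xs[mid] := hmono i mid (by have := hi; rw [hlen] at this; omega) hmid
      simp; omega
    rw [List.countP_eq_length.mpr hall, List.length_take]
    omega
  conv_rhs => rw [hxs]
  rw [List.countP_append, htake]
  omega

-- and ¬ xs[mid] < x caps the count at mid
lemma countP_lt_upper (xs : List Int) (x : Int)
    (hmono : ∀ p q : Nat, (hpq : p ≤ q) → (hq : q < xs.length) → xs[p]'(by omega) ≤ xs[q])
    (mid : Nat) (hmid : mid < xs.length) (h : ¬ xs[mid] < x) :
    xs.countP (fun a => decide (a < x)) ≤ mid := by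
  have hxs : xs = xs.take mid ++ xs.drop mid := (List.take_append_drop _ _).symm
  have hdrop : (xs.drop mid).countP (fun a => decide (a < x)) = 0 := by
    rw [List.countP_eq_zero]
    intro a ha
    rcases List.mem_iff_getElem.mp ha with ⟨i, hi, rfl⟩
    have hi' : mid + i < xs.length := by
      have := hi; rw [List.length_drop] at this; omega
    have : (xs.drop mid)[i] = xs[mid + i]'hi' := List.getElem_drop
    rw [this]
    have hle : xs[mid] ≤ xs[mid + i]'hi' := hmono mid (mid + i) (by omega) hi'
    simp; omega
  conv_lhs => rw [hxs]
  rw [List.countP_append, hdrop]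
  have := List.countP_le_length (p := fun a => decide (a < x)) (l := xs.take mid)
  rw [List.length_take] at this
  omega

-- the binary search lands exactly on the count of elements < x
lemma bisLeft_eq_countP (xs : List Int) (x : Int)
    (hmono : ∀ p q : Nat, (hpq : p ≤ q) → (hq : q < xs.length) → xs[p]'(by omega) ≤ xs[q]) :
    ∀ lo hi, hi ≤ xs.length → lo ≤ xs.countP (fun a => decide (a < x)) →
      xs.countP (fun a => decide (a < x)) ≤ hi → bisLeft xs x lo hi = xs.countP (fun a => decide (a < x)) := by
  intro lo hi
  fun_induction bisLeft xs x lo hi with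
  | case1 lo hi hlt mid hcond ih =>
    intro hhi hlo hc
    have hmid : mid < xs.length := by simp only [mid]; omega
    rw [List.getD_eq_getElem _ _ hmid] at hcond
    have := countP_lt_lower xs x hmono mid hmid hcond
    exact ih hhi (by omega) hc
  | case2 lo hi hlt mid hcond ih =>
    intro hhi hlo hc
    have hmid : mid < xs.length := by simp only [mid]; omega
    rw [List.getD_eq_getElem _ _ hmid] at hcond
    have := countP_lt_upper xs x hmono mid hmid hcond
    exact ih (by omega) hlo this
  | case3 lo hi hlt =>
    intro _ hlo hc
    omega

-- A's counting loop computes countP (85 ≤ ·)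
lemma foldl_count (l : List Int) (c : Int) :
    l.foldl (fun c i => if 85 ≤ i then c + 1 else c) c
      = c + (l.countP (fun a => decide (85 ≤ a)) : Int) := by
  induction l generalizing c with
  | nil => simp
  | cons a t ih =>
    simp only [List.foldl_cons, List.countP_cons]
    by_cases h : (85 : Int) ≤ a
    · rw [if_pos h, ih]; simp [h]; ring
    · rw [if_neg h, ih]; simp [h]

-- the two counts are complementary
lemma countP_ge_eq_sub (l : List Int) :
    l.countP (fun a => decide (85 ≤ a)) = l.length - l.countP (fun a => decide (a < 85)) := by
  have h := List.length_eq_countP_add_countP (p := fun a : Int => decide (a < 85)) (l := l)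
  have hcongr : l.countP (fun a : Int => decide (¬ (decide (a < 85)) = true))
      = l.countP (fun a : Int => decide (85 ≤ a)) := by
    apply List.countP_congr
    intro a _
    simp
  omega

-- ===== VERDICT (by name: the statement is the Claim_ definition above) =====
theorem f_spec : Claim_equal_f := by
  intro grade _
  unfold Spec_f f f_alt
  set g := PySem.List.sorted grade (fun x => x) false with hg
  have hmono : ∀ p q : Nat, (hpq : p ≤ q) → (hq : q < g.length) → g[p]'(by omega) ≤ g[q] := by
    intro p q hpq hq
    exact PySem.List.sorted_id_getElem_mono grade hpq hq
  set c := g.countP (fun a => decide (a < 85)) with hc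
  have hcle : c ≤ g.length := List.countP_le_length
  have hbis : bisLeft g 85 0 g.length = c :=
    bisLeft_eq_countP g 85 hmono 0 g.length (le_refl _) (Nat.zero_le _) hcle
  have hcnt : g.foldl (fun c i => if 85 ≤ i then c + 1 else c) (0 : Int)
      = ((g.length - c : Nat) : Int) := by
    rw [foldl_count, countP_ge_eq_sub, ← hc]; simp
  simp only [hbis, hcnt]
  have hcast : ((g.length - c : Nat) : Int) = (g.length : Int) - (c : Int) := by
    omega
  rw [hcast]
  by_cases h : 6 * (g.length : Int) ≤ 10 * ((g.length : Int) - (c : Int))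
  · simp [h]
  · simp [h]
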